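-- pv_equiv track=rewrite | github.com/tgostmi/HonoAI | backend/humanizer/learning.py | format_lessons_for_prompt
-- ===== SOURCE A (Python) =====
-- from typing import Optional, Dict, List
--
-- def format_lessons_for_prompt(lessons: List[Dict], max_chars: int = 500) -> str:
--     if not lessons:
--         return ""
--
--     lines = ["ПОМНИ (уроки из опыта):"]
--     total_chars = len(lines[0])
--
--     for lesson in lessons:
--         line = f"• {lesson['lesson']}"
--         if total_chars + len(line) > max_chars:
--             break
--         lines.append(line)
--         total_chars += len(line)
--
--     if len(lines) == 1:
--         return ""
--
--     return "\n".join(lines)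
-- ===== SOURCE B (Python) =====
-- from typing import Dict, List
--
-- def format_lessons_for_prompt(lessons: List[Dict], max_chars: int = 500) -> str:
--     header = "ПОМНИ (уроки из опыта):"
--     lines = ["• %s" % l["lesson"] for l in lessons]
--     # prefix[i] = len(header) + total length of the first i lines (nondecreasing)
--     prefix = [len(header)]
--     for s in lines:
--         prefix.append(prefix[-1] + len(s))
--     # binary search (bisect_right) for the number of prefix sums <= max_chars
--     lo, hi = 0, len(prefix)
--     while lo < hi:
--         mid = (lo + hi) // 2
--         if prefix[mid] <= max_chars:
--             lo = mid + 1
--         else: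
--             hi = mid
--     k = lo - 1  # number of lessons that fit
--     if k <= 0:
--         return ""
--     return "\n".join([header] + lines[:k])
-- ===== Notes on version B (the rewrite author's own statement) =====
-- stated objective: alternative
-- what changed: Instead of A's single greedy loop that accumulates a running total and breaks, B builds the prefix-sum array of line lengths (seeded with the header length) and binary-searches it (a hand-rolled bisect_right over the monotone prefix sums) for the number of lessons that fit, then slices and joins.
-- outside the precondition, e.g. on format_lessons_for_prompt([{'lesson': 'lesson'}, {'lesson': 'c1'}, {'c1': 'y'}], 4): A returns '', B raises KeyError
import Mathlib
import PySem

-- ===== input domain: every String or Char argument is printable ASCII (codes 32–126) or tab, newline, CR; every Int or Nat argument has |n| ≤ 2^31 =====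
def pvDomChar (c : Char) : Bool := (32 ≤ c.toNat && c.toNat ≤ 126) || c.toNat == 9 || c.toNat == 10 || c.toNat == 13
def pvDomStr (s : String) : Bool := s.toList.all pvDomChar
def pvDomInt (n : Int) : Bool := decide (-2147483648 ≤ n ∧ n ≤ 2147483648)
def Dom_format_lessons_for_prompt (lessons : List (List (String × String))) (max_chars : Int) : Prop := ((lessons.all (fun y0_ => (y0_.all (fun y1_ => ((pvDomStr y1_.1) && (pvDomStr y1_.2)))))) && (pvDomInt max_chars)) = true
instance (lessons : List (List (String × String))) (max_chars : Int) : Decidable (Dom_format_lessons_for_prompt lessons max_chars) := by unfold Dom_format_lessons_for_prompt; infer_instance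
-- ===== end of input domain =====

-- B replaces A's greedy accumulate-and-break loop by a staged algorithm: build the prefix-sum
-- array of line lengths and binary-search it (bisect_right) for the cutoff (objective: alternative).


-- ===== PORT A =====
-- f"• {lesson['lesson']}" (shared formatting expression of both programs)
def lineOf (l : List (String × String)) : String := "• " ++ (PySem.Dict.mk l).getD "lesson" ""

-- the for-loop with its break: state = (lines so far, total_chars)
def fmtLoopA (lessons : List (List (String × String))) (max_chars : Int)
    (lines : List String) (total : Int) : List String :=
  match lessons with
  | [] => lines
  | l :: rest =>
      let line := lineOf l
      if total + (PySem.Str.len line : Int) > max_chars then lines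
      else fmtLoopA rest max_chars (lines ++ [line]) (total + (PySem.Str.len line : Int))

def format_lessons_for_prompt (lessons : List (List (String × String))) (max_chars : Int) : String :=
  if lessons = [] then ""
  else
    let header := "ПОМНИ (уроки из опыта):"
    let lines := fmtLoopA lessons max_chars [header] (PySem.Str.len header : Int)
    if lines.length = 1 then "" else PySem.Str.join "\n" lines

-- ===== PORT B =====
-- the prefix-building loop: `prefix.append(prefix[-1] + len(s))`, tracking last = prefix[-1]
def buildPrefix (lines : List String) (last : Int) : List Int :=
  match lines with
  | [] => []
  | s :: rest =>
      let nl := last + (PySem.Str.len s : Int)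
      nl :: buildPrefix rest nl

-- the `while lo < hi` binary search; p.getD mid 0 ports prefix[mid] (mid is always in range)
def bsearch (p : List Int) (mc : Int) (lo hi : Nat) : Nat :=
  if h : lo < hi then
    if p.getD ((lo + hi) / 2) 0 ≤ mc then bsearch p mc ((lo + hi) / 2 + 1) hi
    else bsearch p mc lo ((lo + hi) / 2)
  else lo
termination_by hi - lo
decreasing_by all_goals omega

def format_lessons_for_prompt_alt (lessons : List (List (String × String))) (max_chars : Int) : String :=
  let header := "ПОМНИ (уроки из опыта):"
  let lines := lessons.map lineOf
  let pfx := (PySem.Str.len header : Int) :: buildPrefix lines (PySem.Str.len header : Int)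
  let lo := bsearch pfx max_chars 0 pfx.length
  let k : Int := (lo : Int) - 1
  if k ≤ 0 then "" else PySem.Str.join "\n" (header :: lines.take k.toNat)

-- ===== PRECONDITION & SPEC =====
-- Pre_ excludes lesson lists containing a dict without a "lesson" key: there Python A raises
-- KeyError unless its break fires first, while B formats every line eagerly and always raises.
def Pre_format_lessons_for_prompt (lessons : List (List (String × String))) (max_chars : Int) : Prop :=
  ∀ l ∈ lessons, (PySem.Dict.mk l).contains "lesson" = true
instance (lessons : List (List (String × String))) (max_chars : Int) : Decidable (Pre_format_lessons_for_prompt lessons max_chars) := by unfold Pre_format_lessons_for_prompt; infer_instance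
def pvWitness_format_lessons_for_prompt : (List (List (String × String))) × Int := ([[("lesson", "test")]], 500)

def Spec_format_lessons_for_prompt (lessons : List (List (String × String))) (max_chars : Int) (out : String) : Prop := out = format_lessons_for_prompt_alt lessons max_chars
instance (lessons : List (List (String × String))) (max_chars : Int) (out : String) : Decidable (Spec_format_lessons_for_prompt lessons max_chars out) := by unfold Spec_format_lessons_for_prompt; infer_instance

-- ===== CLAIM (what is proved, stated in full; the proofs are below) =====
def Claim_equal_format_lessons_for_prompt : Prop := ∀ (lessons : List (List (String × String))) (max_chars : Int), Dom_format_lessons_for_prompt lessons max_chars → Pre_format_lessons_for_prompt lessons max_chars → Spec_format_lessons_for_prompt lessons max_chars (format_lessons_for_prompt lessons max_chars)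

-- ===== LEMMAS AND PROOFS =====

-- number of consecutive lines that still fit, starting from a running total
def fitCnt (max_chars : Int) : Int → List Int → Nat
  | _, [] => 0
  | total, x :: xs => if total + x ≤ max_chars then fitCnt max_chars (total + x) xs + 1 else 0

-- A's loop appends exactly the fitting prefix of the remaining lines.
theorem fmtLoopA_eq (lessons : List (List (String × String))) (max_chars : Int)
    (acc : List String) (total : Int) :
    fmtLoopA lessons max_chars acc total =
      acc ++ (lessons.map lineOf).take
        (fitCnt max_chars total ((lessons.map lineOf).map (fun s => (PySem.Str.len s : Int)))) := by
  induction lessons generalizing acc total with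
  | nil => simp [fmtLoopA, fitCnt]
  | cons l rest ih =>
      simp only [fmtLoopA, List.map_cons, fitCnt]
      by_cases h : total + (PySem.Str.len (lineOf l) : Int) ≤ max_chars
      · rw [if_neg (not_lt.mpr h), if_pos h, ih]
        simp
      · rw [if_pos (not_le.mp h), if_neg h]
        simp

-- B's prefix list is the scanl of the line lengths.
theorem buildPrefix_eq (lines : List String) (last : Int) :
    last :: buildPrefix lines last =
      (lines.map (fun s => (PySem.Str.len s : Int))).scanl (· + ·) last := by
  induction lines generalizing last with
  | nil => simp [buildPrefix]
  | cons s rest ih =>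
      rw [List.map_cons, List.scanl_cons]
      simp only [buildPrefix]
      exact congrArg (List.cons last) (ih (last + (PySem.Str.len s : Int)))

-- the takeWhile length of the running totals counts the same prefix (plus the header entry).
theorem takeWhile_scanl_eq (max_chars total : Int) (lens : List Int) :
    ((lens.scanl (· + ·) total).takeWhile (fun t => t ≤ max_chars)).length =
      if total ≤ max_chars then fitCnt max_chars total lens + 1 else 0 := by
  induction lens generalizing total with
  | nil =>
      by_cases h : total ≤ max_chars
      · simp [List.scanl_nil, h, fitCnt]
      · simp [List.scanl_nil, h]
  | cons x xs ih =>
      rw [List.scanl_cons]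
      by_cases h : total ≤ max_chars
      · rw [List.takeWhile_cons_of_pos (by simpa using h)]
        simp only [List.length_cons, ih, fitCnt, if_pos h]
      · rw [List.takeWhile_cons_of_neg (by simpa using h)]
        simp [h]

theorem fitCnt_zero (max_chars total : Int) (lens : List Int)
    (hnn : ∀ x ∈ lens, 0 ≤ x) (h : max_chars < total) :
    fitCnt max_chars total lens = 0 := by
  cases lens with
  | nil => rfl
  | cons x xs =>
      have hx : 0 ≤ x := hnn x (List.mem_cons_self ..)
      simp only [fitCnt]
      rw [if_neg (by omega)]

theorem fitCnt_le (max_chars total : Int) (lens : List Int) :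
    fitCnt max_chars total lens ≤ lens.length := by
  induction lens generalizing total with
  | nil => simp [fitCnt]
  | cons x xs ih =>
      simp only [fitCnt]
      split_ifs with h
      · simpa using ih (total + x)
      · simp

-- every element of a scanl over nonnegative increments is ≥ its seed
theorem scanl_seed_le (total : Int) (lens : List Int) (hnn : ∀ x ∈ lens, 0 ≤ x) :
    ∀ y ∈ lens.scanl (· + ·) total, total ≤ y := by
  induction lens generalizing total with
  | nil => intro y hy; simp [List.scanl_nil] at hy; omega
  | cons x xs ih =>
      intro y hy
      rw [List.scanl_cons] at hy
      rcases List.mem_cons.mp hy with h | h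
      · omega
      · have hx : 0 ≤ x := hnn x (List.mem_cons_self ..)
        have := ih (total + x) (fun z hz => hnn z (List.mem_cons_of_mem _ hz)) y h
        omega

theorem scanl_pairwise (total : Int) (lens : List Int) (hnn : ∀ x ∈ lens, 0 ≤ x) :
    (lens.scanl (· + ·) total).Pairwise (· ≤ ·) := by
  induction lens generalizing total with
  | nil => simp [List.scanl_nil]
  | cons x xs ih =>
      rw [List.scanl_cons]
      have hx : 0 ≤ x := hnn x (List.mem_cons_self ..)
      refine List.pairwise_cons.mpr ⟨?_, ih (total + x) (fun z hz => hnn z (List.mem_cons_of_mem _ hz))⟩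
      intro y hy
      have := scanl_seed_le (total + x) xs (fun z hz => hnn z (List.mem_cons_of_mem _ hz)) y hy
      omega

theorem tw_len_le {α : Type} (q : α → Bool) (l : List α) :
    (l.takeWhile q).length ≤ l.length := by
  induction l with
  | nil => simp
  | cons x xs ih =>
      by_cases hq : q x
      · rw [List.takeWhile_cons_of_pos hq]; simpa using ih
      · rw [List.takeWhile_cons_of_neg hq]; simp

-- takeWhile index facts, stated with getD
theorem tw_lt {α : Type} [Inhabited α] (q : α → Bool) (l : List α) (d : α) :
    ∀ i, i < (l.takeWhile q).length → q (l.getD i d) = true := by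
  induction l with
  | nil => simp
  | cons x xs ih =>
      intro i hi
      by_cases hq : q x
      · rw [List.takeWhile_cons_of_pos hq] at hi
        cases i with
        | zero => simpa using hq
        | succ j => simpa using ih j (by simpa using hi)
      · rw [List.takeWhile_cons_of_neg hq] at hi
        simp at hi

theorem tw_at {α : Type} (q : α → Bool) (l : List α) (d : α)
    (h : (l.takeWhile q).length < l.length) :
    q (l.getD (l.takeWhile q).length d) = false := by
  induction l with
  | nil => simp at h
  | cons x xs ih =>
      by_cases hq : q x
      · rw [List.takeWhile_cons_of_pos hq] at h ⊢
        simpa using ih (by simpa using h)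
      · rw [List.takeWhile_cons_of_neg hq]
        simpa using hq

-- binary-search invariant: if everything below t passes and everything from t on fails,
-- bsearch converges to t
theorem bsearch_eq (p : List Int) (mc : Int) (t : Nat)
    (hlt : ∀ i, i < t → p.getD i 0 ≤ mc)
    (hge : ∀ i, t ≤ i → i < p.length → mc < p.getD i 0) :
    ∀ n lo hi, hi - lo ≤ n → lo ≤ t → t ≤ hi → hi ≤ p.length → bsearch p mc lo hi = t := by
  intro n
  induction n with
  | zero =>
      intro lo hi hn h1 h2 h3
      rw [bsearch, dif_neg (by omega)]
      omega
  | succ n ih =>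
      intro lo hi hn h1 h2 h3
      rw [bsearch]
      by_cases h : lo < hi
      · rw [dif_pos h]
        by_cases hm : p.getD ((lo + hi) / 2) 0 ≤ mc
        · rw [if_pos hm]
          have hmt : (lo + hi) / 2 < t := by
            by_contra hc
            exact absurd (hge ((lo + hi) / 2) (by omega) (by omega)) (by omega)
          exact ih _ hi (by omega) (by omega) h2 h3
        · rw [if_neg hm]
          have hmt : t ≤ (lo + hi) / 2 := by
            by_contra hc
            exact absurd (hlt ((lo + hi) / 2) (by omega)) (by omega)
          exact ih lo _ (by omega) h1 hmt (by omega)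
      · rw [dif_neg h]
        omega

-- the binary search over the monotone prefix sums computes the takeWhile length
theorem bsearch_takeWhile (mc total : Int) (lens : List Int) (hnn : ∀ x ∈ lens, 0 ≤ x) :
    bsearch (lens.scanl (· + ·) total) mc 0 (lens.scanl (· + ·) total).length =
      ((lens.scanl (· + ·) total).takeWhile (fun t => t ≤ mc)).length := by
  set p := lens.scanl (· + ·) total with hp
  set t := (p.takeWhile (fun t => t ≤ mc)).length with ht
  have htle : t ≤ p.length := by rw [ht]; exact tw_len_le _ p
  have hpw := scanl_pairwise total lens hnn
  have hmono : ∀ i j, i ≤ j → j < p.length → p.getD i 0 ≤ p.getD j 0 := by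
    intro i j hij hj
    rcases Nat.eq_or_lt_of_le hij with rfl | hlt'
    · exact le_refl _
    · rw [List.getD_eq_getElem p 0 (lt_trans hlt' hj), List.getD_eq_getElem p 0 hj]
      exact List.pairwise_iff_getElem.mp hpw i j (lt_trans hlt' hj) hj hlt'
  refine bsearch_eq p mc t ?_ ?_ p.length 0 p.length (by omega) (by omega) htle (by omega)
  · intro i hi
    have := tw_lt (fun t => t ≤ mc) p 0 i (ht ▸ hi)
    simpa using this
  · intro i hti hi
    have hf : ¬ (p.getD t 0 ≤ mc) := by
      have := tw_at (fun t => t ≤ mc) p 0 (by omega)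
      simpa using this
    have := hmono t i hti hi
    omega

-- ===== VERDICT (by name: the statement is the Claim_ definition above) =====
theorem format_lessons_for_prompt_spec : Claim_equal_format_lessons_for_prompt := by
  intro lessons max_chars _ _
  unfold Spec_format_lessons_for_prompt format_lessons_for_prompt format_lessons_for_prompt_alt
  simp only []
  rw [fmtLoopA_eq]
  set H : Int := (PySem.Str.len "ПОМНИ (уроки из опыта):" : Int) with hH
  set lens := ((lessons.map lineOf).map (fun s => (PySem.Str.len s : Int))) with hlens
  have hnn : ∀ x ∈ lens, 0 ≤ x := by
    intro x hx
    rw [hlens] at hx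
    obtain ⟨s, _, rfl⟩ := List.mem_map.mp hx
    exact Int.natCast_nonneg _
  rw [buildPrefix_eq (lessons.map lineOf) H, ← hlens,
      bsearch_takeWhile max_chars H lens hnn, takeWhile_scanl_eq]
  by_cases hnil : lessons = []
  · subst hnil
    rw [if_pos rfl]
    simp only [hlens, List.map_nil, fitCnt]
    by_cases hh : H ≤ max_chars
    · rw [if_pos hh, if_pos (by norm_num)]
    · rw [if_neg hh, if_pos (by norm_num)]
  · rw [if_neg hnil]
    by_cases hh : H ≤ max_chars
    · rw [if_pos hh]
      set c := fitCnt max_chars H lens with hc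
      by_cases hc0 : c = 0
      · rw [if_pos (show ((c + 1 : Nat) : Int) - 1 ≤ 0 by omega)]
        rw [if_pos (by simp [hc0])]
      · rw [if_neg (show ¬ (((c + 1 : Nat) : Int) - 1 ≤ 0) by omega)]
        have hlines : c ≤ lessons.length := by
          rw [hc, hlens]
          simpa using fitCnt_le max_chars H (List.map (fun s => (PySem.Str.len s : Int)) (List.map lineOf lessons))
        have hpos : 0 < (lessons.map lineOf).length := by
          simpa [List.length_pos_iff_ne_nil] using hnil
        rw [if_neg (by
          simp only [List.length_append, List.length_take, List.length_cons, List.length_nil,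
            List.length_map] at *
          omega)]
        have ht : (((c + 1 : Nat) : Int) - 1).toNat = c := by omega
        rw [ht]
        simp
    · rw [if_neg hh]
      rw [fitCnt_zero max_chars H lens hnn (not_le.mp hh)]
      rw [if_pos (by norm_num), if_pos (by simp)]
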